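-- pv_equiv track=rewrite | github.com/nisc586/aoc2020 | day25/part1.py | transform
-- ===== SOURCE A (Python) =====
-- def transform(subject_number, loop_size):
--     CONST = 20201227
--     value = 1
--     transforms = [value]
--     for _ in range(loop_size):
--         value = (value * subject_number) % CONST
--         transforms.append(value)
--     return transforms
-- ===== SOURCE B (Python) =====
-- def transform(subject_number, loop_size):
--     return [1] + [pow(subject_number, k, 20201227) for k in range(1, loop_size + 1)]
-- ===== Notes on version B (the rewrite author's own statement) =====
-- stated objective: simpler
-- what changed: Replaces the explicit accumulate-and-append loop by a closed-form comprehension: element k is pow(subject_number, k, 20201227), so no running state is threaded at all.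
import Mathlib
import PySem

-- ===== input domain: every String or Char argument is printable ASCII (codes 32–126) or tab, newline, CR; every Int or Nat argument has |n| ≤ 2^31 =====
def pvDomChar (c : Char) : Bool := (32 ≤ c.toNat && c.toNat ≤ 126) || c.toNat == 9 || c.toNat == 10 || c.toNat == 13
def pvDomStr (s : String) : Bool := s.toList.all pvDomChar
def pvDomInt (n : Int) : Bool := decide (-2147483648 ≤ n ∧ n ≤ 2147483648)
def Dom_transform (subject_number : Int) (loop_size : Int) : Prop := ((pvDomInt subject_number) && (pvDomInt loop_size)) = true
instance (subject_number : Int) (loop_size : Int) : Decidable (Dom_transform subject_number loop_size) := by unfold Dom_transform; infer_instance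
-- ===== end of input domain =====

-- B replaces A's stateful append loop by a closed-form comprehension (element k = subject_number^k mod 20201227); objective: simpler, same cost class.

-- ===== PORT A =====
-- literal port of A: fold over range(loop_size) threading (value, transforms)
def transform (subject_number : Int) (loop_size : Int) : List Int :=
  let st := (PySem.List.pyRange 0 loop_size 1).foldl
    (fun (st : Int × List Int) _ =>
      let value := PySem.Int.mod (st.1 * subject_number) 20201227
      (value, st.2 ++ [value]))
    (1, [1])
  st.2

-- ===== PORT B =====
-- pow(s, k, 20201227) with k ≥ 0 ported as s^k mod 20201227 (Python mod)
def transform_alt (subject_number : Int) (loop_size : Int) : List Int :=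
  [1] ++ (PySem.List.pyRange 1 (loop_size + 1) 1).map
    (fun k => PySem.Int.mod (subject_number ^ k.toNat) 20201227)

-- ===== PRECONDITION & SPEC =====
def Spec_transform (subject_number : Int) (loop_size : Int) (out : List Int) : Prop := out = transform_alt subject_number loop_size
instance (subject_number : Int) (loop_size : Int) (out : List Int) : Decidable (Spec_transform subject_number loop_size out) := by unfold Spec_transform; infer_instance

-- ===== CLAIM (what is proved, stated in full; the proofs are below) =====
def Claim_equal_transform : Prop := ∀ (subject_number : Int) (loop_size : Int), Dom_transform subject_number loop_size → Spec_transform subject_number loop_size (transform subject_number loop_size)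

-- ===== LEMMAS AND PROOFS =====

theorem mod_mul_step (s : Int) (m : Nat) :
    PySem.Int.mod (PySem.Int.mod (s ^ m) 20201227 * s) 20201227
      = PySem.Int.mod (s ^ (m + 1)) 20201227 := by
  simp only [PySem.Int.mod_eq_emod_of_pos (by norm_num : (0:Int) < 20201227)]
  rw [Int.mul_emod, Int.emod_emod_of_dvd _ dvd_rfl, ← Int.mul_emod, ← pow_succ]

-- loop invariant: after n iterations the state is (s^n mod C, 1 :: [s^1 mod C, …, s^n mod C])
theorem transform_loop_inv (s : Int) (n : Nat) :
    (PySem.List.pyRange 0 (n : Int) 1).foldl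
      (fun (st : Int × List Int) _ =>
        let value := PySem.Int.mod (st.1 * s) 20201227
        (value, st.2 ++ [value]))
      (1, [1])
    = (PySem.Int.mod (s ^ n) 20201227,
       1 :: (List.range n).map (fun k => PySem.Int.mod (s ^ (k + 1)) 20201227)) := by
  induction n with
  | zero =>
      simp [PySem.List.pyRange_one_eq_nil, PySem.Int.mod_eq_emod_of_pos]
  | succ m ih =>
      rw [show ((m + 1 : Nat) : Int) = (m : Int) + 1 by push_cast; ring,
        PySem.List.pyRange_one_succ_right (by positivity), List.foldl_append, ih]
      simp only [List.foldl_cons, List.foldl_nil, List.range_succ, List.map_append]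
      rw [mod_mul_step]
      simp

theorem map_pow_shift (s : Int) (n : Nat) :
    List.map (fun k : Int => PySem.Int.mod (s ^ k.toNat) 20201227)
        (PySem.List.pyRange 1 ((n : Int) + 1) 1)
      = List.map (fun k => PySem.Int.mod (s ^ (k + 1)) 20201227) (List.range n) := by
  induction n with
  | zero => simp [PySem.List.pyRange_one_eq_nil]
  | succ m ih =>
      rw [show ((m + 1 : Nat) : Int) + 1 = ((m : Int) + 1) + 1 by push_cast; ring,
        PySem.List.pyRange_one_succ_right (by omega), List.map_append, ih, List.range_succ,
        List.map_append]
      simp only [List.map_cons, List.map_nil]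
      rw [show ((m : Int) + 1).toNat = m + 1 by omega]

-- ===== VERDICT (by name: the statement is the Claim_ definition above) =====
theorem transform_spec : Claim_equal_transform := by
  intro s n _
  unfold Spec_transform transform transform_alt
  rcases le_or_gt n 0 with hn | hn
  · rcases Int.exists_eq_neg_ofNat hn with ⟨m, rfl⟩
    rw [PySem.List.pyRange_one_eq_nil (by omega),
      PySem.List.pyRange_one_eq_nil (by omega)]
    simp
  · obtain ⟨m, rfl⟩ : ∃ m : Nat, n = (m : Int) := ⟨n.toNat, (Int.toNat_of_nonneg hn.le).symm⟩
    rw [transform_loop_inv, map_pow_shift]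
    simp
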